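-- pv_equiv track=rewrite | github.com/JiachengZhao98/Jacob-s-Algorithm-Journal | test.py | minTotalCost
-- ===== SOURCE A (Python) =====
-- def minTotalCost(n, price):
--     # Calculate the total cost without using the special offer
--     original_cost = sum(abs(price[i] - price[i+1]) for i in range(n-1))
--
--     max_reduction = 0
--     for i in range(n):
--         reduction = 0
--         # Calculate the reduction in cost for the left neighbor
--         if i > 0:
--             reduction += abs(price[i] - price[i-1]) - abs(price[i] // 2 - price[i-1])
--         # Calculate the reduction in cost for the right neighbor
--         if i < n-1:
--             reduction += abs(price[i] - price[i+1]) - abs(price[i] // 2 - price[i+1])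
--         max_reduction = max(max_reduction, reduction)
--
--     return original_cost - max_reduction
-- ===== SOURCE B (Python) =====
-- def minTotalCost(n, price):
--     # Brute force: for each vertex rebuild the path with that price halved and
--     # recompute the whole path cost from scratch; declining the offer is the
--     # initial candidate.  No incremental reduction arithmetic at all.
--     def path_cost(lst):
--         return sum(abs(lst[j] - lst[j+1]) for j in range(n - 1))
--     best = path_cost(price)
--     for i in range(n):
--         halved = list(price)
--         halved[i] = price[i] // 2
--         best = min(best, path_cost(halved))
--     return best
-- ===== Notes on version B (the rewrite author's own statement) =====
-- stated objective: alternative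
-- what changed: B drops A's incremental reduction arithmetic entirely: for each vertex it rebuilds the price list with that entry halved and recomputes the whole path cost from scratch, minimising over the candidates (declining the offer is the initial one).
-- outside the precondition, e.g. on minTotalCost(1, []): A returns 0, B raises IndexError
import Mathlib
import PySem

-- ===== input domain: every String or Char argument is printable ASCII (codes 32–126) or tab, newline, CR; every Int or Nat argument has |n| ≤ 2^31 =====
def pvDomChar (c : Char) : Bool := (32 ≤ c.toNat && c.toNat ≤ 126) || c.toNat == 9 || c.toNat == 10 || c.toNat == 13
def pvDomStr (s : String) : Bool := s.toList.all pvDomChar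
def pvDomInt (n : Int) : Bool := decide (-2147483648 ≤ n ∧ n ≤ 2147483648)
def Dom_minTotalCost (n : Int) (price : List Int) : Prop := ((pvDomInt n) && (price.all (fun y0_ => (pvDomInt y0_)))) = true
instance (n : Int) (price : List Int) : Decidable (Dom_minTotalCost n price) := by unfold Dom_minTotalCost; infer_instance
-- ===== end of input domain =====

-- B discards A's incremental reduction arithmetic: it rebuilds the list with each
-- vertex halved and recomputes the whole path cost from scratch (objective: alternative).


-- ===== PORT A =====
def minTotalCost (n : Int) (price : List Int) : Int :=
  let original_cost : Int :=
    ((PySem.List.pyRange 0 (n-1) 1).map (fun i =>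
      |PySem.List.pyGetD price i 0 - PySem.List.pyGetD price (i+1) 0|)).sum
  let max_reduction : Int :=
    (PySem.List.pyRange 0 n 1).foldl (fun max_reduction i =>
      let reduction : Int :=
        (if 0 < i then
          |PySem.List.pyGetD price i 0 - PySem.List.pyGetD price (i-1) 0| -
          |PySem.Int.floordiv (PySem.List.pyGetD price i 0) 2 - PySem.List.pyGetD price (i-1) 0|
         else 0) +
        (if i < n-1 then
          |PySem.List.pyGetD price i 0 - PySem.List.pyGetD price (i+1) 0| -
          |PySem.Int.floordiv (PySem.List.pyGetD price i 0) 2 - PySem.List.pyGetD price (i+1) 0|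
         else 0)
      max max_reduction reduction) 0
  original_cost - max_reduction

-- ===== PORT B =====
-- helper: B's path_cost over the first n entries
def pathCost (n : Int) (lst : List Int) : Int :=
  ((PySem.List.pyRange 0 (n-1) 1).map (fun j =>
    |PySem.List.pyGetD lst j 0 - PySem.List.pyGetD lst (j+1) 0|)).sum

def minTotalCost_alt (n : Int) (price : List Int) : Int :=
  (PySem.List.pyRange 0 n 1).foldl (fun best i =>
    let halved : List Int :=
      PySem.List.pySetD price i (PySem.Int.floordiv (PySem.List.pyGetD price i 0) 2)
    min best (pathCost n halved)) (pathCost n price)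

-- ===== PRECONDITION & SPEC =====
-- Pre_ excludes inputs with fewer than n prices: for n ≥ 2 Python A raises IndexError
-- there, and for n = 1 with an empty list (where A accidentally returns 0) B's natural
-- rebuild indexes price[0] and raises.
def Pre_minTotalCost (n : Int) (price : List Int) : Prop :=
  n ≤ (price.length : Int)
instance (n : Int) (price : List Int) : Decidable (Pre_minTotalCost n price) := by
  unfold Pre_minTotalCost; infer_instance
def pvWitness_minTotalCost : Int × List Int := (3, [4, 1, 7])
def Spec_minTotalCost (n : Int) (price : List Int) (out : Int) : Prop := out = minTotalCost_alt n price
instance (n : Int) (price : List Int) (out : Int) : Decidable (Spec_minTotalCost n price out) := by unfold Spec_minTotalCost; infer_instance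

-- ===== CLAIM =====
def Claim_equal_minTotalCost : Prop := ∀ (n : Int) (price : List Int), Dom_minTotalCost n price → Pre_minTotalCost n price → Spec_minTotalCost n price (minTotalCost n price)

-- ===== LEMMAS AND PROOFS =====

-- sum of a one-point indicator over a duplicate-free list
theorem sum_map_indicator {l : List Int} (hnd : l.Nodup) (c a : Int) :
    (l.map (fun j => if j = c then a else 0)).sum = if c ∈ l then a else 0 := by
  induction l with
  | nil => simp
  | cons x t ih =>
    rcases List.nodup_cons.1 hnd with ⟨hx, ht⟩
    by_cases hxc : x = c
    · subst hxc
      simp [List.map_cons, ih ht, hx]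
    · simp [List.map_cons, ih ht, hxc, Ne.symm hxc]

-- reading an element of a pySetD-updated list
theorem pyGetD_pySetD (price : List Int) (i j v : Int)
    (hi0 : 0 ≤ i) (hj0 : 0 ≤ j) (hj : j < (price.length : Int)) :
    PySem.List.pyGetD (PySem.List.pySetD price i v) j 0 =
      if j = i then v else PySem.List.pyGetD price j 0 := by
  rw [PySem.List.pySetD_of_nonneg price v hi0,
      PySem.List.pyGetD_eq_getElem (price.set i.toNat v) 0 hj0 (by simpa using hj),
      List.getElem_set]
  by_cases h : j = i
  · simp [h]
  · have hne : i.toNat ≠ j.toNat := by omega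
    rw [if_neg hne, if_neg h, PySem.List.pyGetD_eq_getElem price 0 hj0 hj]

-- a running min over T - fA is T minus the running max of fA
theorem foldl_min_sub_max (T : Int) (fA fB : Int → Int) (l : List Int)
    (h : ∀ i ∈ l, fB i = T - fA i) (a : Int) :
    l.foldl (fun m i => min m (fB i)) (T - a) =
      T - l.foldl (fun m i => max m (fA i)) a := by
  induction l generalizing a with
  | nil => rfl
  | cons x t ih =>
    have hx := h x (List.mem_cons_self)
    have ht : ∀ i ∈ t, fB i = T - fA i := fun i hi => h i (List.mem_cons_of_mem _ hi)
    simp only [List.foldl_cons, hx]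
    have : min (T - a) (T - fA x) = T - max a (fA x) := by omega
    rw [this, ih ht]

-- B's recomputed cost of the halved path equals the total minus A's reduction
theorem pathCost_halved (n : Int) (price : List Int) (i : Int)
    (hlen : n ≤ (price.length : Int)) (hi0 : 0 ≤ i) (hin : i < n) :
    pathCost n (PySem.List.pySetD price i (PySem.Int.floordiv (PySem.List.pyGetD price i 0) 2)) =
      pathCost n price -
      ((if 0 < i then
          |PySem.List.pyGetD price i 0 - PySem.List.pyGetD price (i-1) 0| -
          |PySem.Int.floordiv (PySem.List.pyGetD price i 0) 2 - PySem.List.pyGetD price (i-1) 0|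
        else 0) +
       (if i < n-1 then
          |PySem.List.pyGetD price i 0 - PySem.List.pyGetD price (i+1) 0| -
          |PySem.Int.floordiv (PySem.List.pyGetD price i 0) 2 - PySem.List.pyGetD price (i+1) 0|
        else 0)) := by
  set v : Int := PySem.Int.floordiv (PySem.List.pyGetD price i 0) 2 with hv
  have hpoint : ∀ j ∈ PySem.List.pyRange 0 (n-1) 1,
      |PySem.List.pyGetD (PySem.List.pySetD price i v) j 0 -
       PySem.List.pyGetD (PySem.List.pySetD price i v) (j+1) 0| =
      (|PySem.List.pyGetD price j 0 - PySem.List.pyGetD price (j+1) 0| +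
        ((if j = i-1 then
            |v - PySem.List.pyGetD price (i-1) 0| -
            |PySem.List.pyGetD price i 0 - PySem.List.pyGetD price (i-1) 0|
          else 0) +
         (if j = i then
            |v - PySem.List.pyGetD price (i+1) 0| -
            |PySem.List.pyGetD price i 0 - PySem.List.pyGetD price (i+1) 0|
          else 0))) := by
    intro j hj
    have hjr := (PySem.List.mem_pyRange_one).1 hj
    rw [pyGetD_pySetD price i j v hi0 (by omega) (by omega),
        pyGetD_pySetD price i (j+1) v hi0 (by omega) (by omega)]
    by_cases h1 : j = i
    · have h2 : ¬ (j + 1 = i) := by omega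
      have h3 : ¬ (j = i - 1) := by omega
      rw [if_pos h1, if_neg h2, if_neg h3, if_pos h1, h1]
      ring
    · by_cases h2 : j + 1 = i
      · have h3 : j = i - 1 := by omega
        rw [if_neg h1, if_pos h2, if_pos h3, if_neg h1, h3]
        have e1 : i - 1 + 1 = i := by ring
        rw [e1, abs_sub_comm (PySem.List.pyGetD price (i-1) 0) v,
            abs_sub_comm (PySem.List.pyGetD price (i-1) 0) (PySem.List.pyGetD price i 0)]
        ring
      · have h3 : ¬ (j = i - 1) := by omega
        rw [if_neg h1, if_neg h2, if_neg h3, if_neg h1]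
        ring
  unfold pathCost
  rw [List.map_congr_left hpoint, PySem.List.sum_map_add_int, PySem.List.sum_map_add_int,
      sum_map_indicator (PySem.List.nodup_pyRange_one 0 (n-1)),
      sum_map_indicator (PySem.List.nodup_pyRange_one 0 (n-1))]
  simp only [PySem.List.mem_pyRange_one]
  by_cases h1 : 0 < i <;> by_cases h2 : i < n - 1
  · rw [if_pos (by omega : (0:Int) ≤ i - 1 ∧ i - 1 < n - 1),
        if_pos (by omega : (0:Int) ≤ i ∧ i < n - 1), if_pos h1, if_pos h2]
    ring
  · rw [if_pos (by omega : (0:Int) ≤ i - 1 ∧ i - 1 < n - 1),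
        if_neg (by omega : ¬ ((0:Int) ≤ i ∧ i < n - 1)), if_pos h1, if_neg h2]
    ring
  · rw [if_neg (by omega : ¬ ((0:Int) ≤ i - 1 ∧ i - 1 < n - 1)),
        if_pos (by omega : (0:Int) ≤ i ∧ i < n - 1), if_neg h1, if_pos h2]
    ring
  · rw [if_neg (by omega : ¬ ((0:Int) ≤ i - 1 ∧ i - 1 < n - 1)),
        if_neg (by omega : ¬ ((0:Int) ≤ i ∧ i < n - 1)), if_neg h1, if_neg h2]
    ring

-- ===== VERDICT =====
theorem minTotalCost_spec : Claim_equal_minTotalCost := by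
  intro n price _ hpre
  unfold Spec_minTotalCost minTotalCost minTotalCost_alt
  simp only
  have key := foldl_min_sub_max (pathCost n price)
    (fun i =>
      (if 0 < i then
        |PySem.List.pyGetD price i 0 - PySem.List.pyGetD price (i-1) 0| -
        |PySem.Int.floordiv (PySem.List.pyGetD price i 0) 2 - PySem.List.pyGetD price (i-1) 0|
       else 0) +
      (if i < n-1 then
        |PySem.List.pyGetD price i 0 - PySem.List.pyGetD price (i+1) 0| -
        |PySem.Int.floordiv (PySem.List.pyGetD price i 0) 2 - PySem.List.pyGetD price (i+1) 0|
       else 0))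
    (fun i => pathCost n
      (PySem.List.pySetD price i (PySem.Int.floordiv (PySem.List.pyGetD price i 0) 2)))
    (PySem.List.pyRange 0 n 1)
    (by
      intro i hi
      have hir := (PySem.List.mem_pyRange_one).1 hi
      exact pathCost_halved n price i hpre hir.1 hir.2) 0
  simp only [sub_zero] at key
  exact key.symm
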